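-- pv_equiv track=rewrite | github.com/tmjo/ha-norwegianweather | custom_components/norwegianweather/testplot.py | massage_yrdata
-- ===== SOURCE A (Python) =====
-- def massage_yrdata(wd):
--     dd = {}
--     for time, data in wd.items():
--         for key, value in data.items():
--             if dd.get(key, None) is None:
--                 dd[key] = []
--             dd[key].append(value)
--
--     for key, value in dd.items():
--         if len(wd.keys()) != len(value):
--             add = len(wd.keys()) - len(value)
--             for i in range(add):
--                 value.append(0)
--
--     return dd
-- ===== SOURCE B (Python) =====
-- def massage_yrdata(wd):
--     n = len(wd)
--     keys = dict.fromkeys(key for data in wd.values() for key in data)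
--     out = {}
--     for k in keys:
--         col = [data[k] for data in wd.values() if k in data]
--         out[k] = col + [0] * (n - len(col))
--     return out
-- ===== Notes on version B (the rewrite author's own statement) =====
-- stated objective: alternative
-- what changed: A builds all per-key lists in one simultaneous pass over the times (creating an empty list on first sight of a key, appending as it goes) and then pads short lists with a zero-appending loop; B first collects the distinct keys in first-appearance order via dict.fromkeys, then builds each key's column by a separate scan over the times, and pads arithmetically by replicating zeros up to the number of times.
import Mathlib
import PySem

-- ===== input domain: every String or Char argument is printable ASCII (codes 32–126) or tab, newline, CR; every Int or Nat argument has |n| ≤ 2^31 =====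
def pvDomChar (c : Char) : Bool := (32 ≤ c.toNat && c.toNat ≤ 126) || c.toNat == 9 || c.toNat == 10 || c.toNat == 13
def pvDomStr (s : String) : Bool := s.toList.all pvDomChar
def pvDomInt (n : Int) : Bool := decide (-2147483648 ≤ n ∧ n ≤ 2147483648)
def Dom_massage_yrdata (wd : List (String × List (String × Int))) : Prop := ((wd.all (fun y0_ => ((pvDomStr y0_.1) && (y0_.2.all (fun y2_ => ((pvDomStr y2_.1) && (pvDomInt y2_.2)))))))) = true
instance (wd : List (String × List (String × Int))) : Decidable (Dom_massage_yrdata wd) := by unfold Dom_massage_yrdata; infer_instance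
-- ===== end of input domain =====

-- B replaces A's single simultaneous grouping pass (with its “create-empty-then-append” dict dance
-- and trailing zero-padding loop) by an ordered-key collection followed by one per-key column scan
-- with arithmetic padding: objective 'alternative' (same asymptotic cost, different decomposition).

-- Shared decoding of the Python argument: 'wd' is a dict[str, dict[str, int]], i.e. the assoc list
-- read with Python-dict semantics (later duplicate keys overwrite, first position kept) at both levels.
def pvWd (wd : List (String × List (String × Int))) : PySem.Dict String (PySem.Dict String Int) :=
  PySem.Dict.ofList (wd.map (fun p => (p.1, PySem.Dict.ofList p.2)))

-- ===== PORT A =====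
def massage_yrdata (wd : List (String × List (String × Int))) : List (String × List Int) :=
  let wdd := pvWd wd
  -- dd = {}; for time, data in wd.items(): for key, value in data.items(): …
  let dd : PySem.Dict String (List Int) :=
    wdd.items.foldl (fun dd td =>
      td.2.items.foldl (fun dd kv =>
        -- if dd.get(key, None) is None: dd[key] = []
        let dd := if dd.get? kv.1 = none then dd.insert kv.1 [] else dd
        -- dd[key].append(value)
        dd.modify kv.1 [] (· ++ [kv.2])) dd) PySem.Dict.empty
  -- for key, value in dd.items(): if len(wd.keys()) != len(value): for i in range(add): value.append(0)
  let n : Int := PySem.List.len wdd.keys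
  dd.items.map (fun kv =>
    (kv.1,
     if n ≠ PySem.List.len kv.2 then
       let add := n - PySem.List.len kv.2
       (PySem.List.pyRange 0 add 1).foldl (fun v _ => v ++ [(0 : Int)]) kv.2
     else kv.2))

-- ===== PORT B =====
def massage_yrdata_alt (wd : List (String × List (String × Int))) : List (String × List Int) :=
  let wdd := pvWd wd
  -- n = len(wd)
  let n := wdd.items.length
  -- keys = dict.fromkeys(key for data in wd.values() for key in data)
  let keys := PySem.List.dedup (wdd.values.flatMap (fun data => data.keys))
  -- for k in keys: col = [data[k] for data in wd.values() if k in data]; out[k] = col + [0]*(n - len(col))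
  keys.map (fun k =>
    let col := wdd.values.filterMap (fun data =>
      if data.contains k then data.get? k else none)
    (k, col ++ List.replicate (n - col.length) (0 : Int)))

-- ===== PRECONDITION & SPEC =====
def Spec_massage_yrdata (wd : List (String × List (String × Int))) (out : List (String × List Int)) : Prop := out = massage_yrdata_alt wd
instance (wd : List (String × List (String × Int))) (out : List (String × List Int)) : Decidable (Spec_massage_yrdata wd out) := by unfold Spec_massage_yrdata; infer_instance

-- ===== CLAIM (what is proved, stated in full; the proofs are below) =====
def Claim_equal_massage_yrdata : Prop := ∀ (wd : List (String × List (String × Int))), Dom_massage_yrdata wd → Spec_massage_yrdata wd (massage_yrdata wd)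

-- ===== LEMMAS AND PROOFS =====

-- A's “insert [] if absent, then append” step is exactly Dict.modify.
theorem pv_stepA_eq_modify (dd : PySem.Dict String (List Int)) (k : String) (v : Int) :
    (let dd' := if dd.get? k = none then dd.insert k [] else dd
     dd'.modify k [] (· ++ [v])) = dd.modify k [] (· ++ [v]) := by
  by_cases h : dd.get? k = none
  · simp only [h, if_pos, PySem.Dict.modify, PySem.Dict.getD_insert_self,
      PySem.Dict.insert_insert_self, List.nil_append]
    rw [PySem.Dict.getD_of_not_contains dd []
      ((PySem.Dict.get?_eq_none_iff_contains dd k).mp h)]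
    simp
  · simp [h]

-- values of an updated dict come from the old dict or the pair list
theorem pv_mem_values_update {w : PySem.Dict String Int}
    (l : List (String × PySem.Dict String Int)) (d : PySem.Dict String (PySem.Dict String Int)) :
    w ∈ (d.update l).values → w ∈ d.values ∨ ∃ p ∈ l, w = p.2 := by
  induction l generalizing d with
  | nil => intro h; exact Or.inl h
  | cons a l ih =>
    intro h
    rcases ih _ h with h' | ⟨p, hp, hw⟩
    · rcases PySem.Dict.mem_values_insert _ _ _ _ h' with h'' | h''
      · exact Or.inr ⟨a, by simp, h''⟩
      · exact Or.inl h''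
    · exact Or.inr ⟨p, by simp [hp], hw⟩

-- every inner dict of pvWd has Nodup keys
theorem pv_nodup_inner (wd : List (String × List (String × Int)))
    {e : PySem.Dict String Int} (he : e ∈ (pvWd wd).values) : e.keys.Nodup := by
  rcases pv_mem_values_update _ _ he with h | ⟨p, hp, he'⟩
  · simp [PySem.Dict.empty, PySem.Dict.values] at h
  · subst he'
    rcases List.mem_map.mp hp with ⟨q, _, hq⟩
    rw [← hq]
    exact PySem.Dict.nodup_keys_ofList _

-- on a Nodup-key item list, filtering by a key and taking the value is find? (= get?)
theorem pv_filter_eq_find (l : List (String × Int)) (k : String)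
    (h : (l.map Prod.fst).Nodup) :
    (l.filter (fun p => p.1 == k)).map (·.2) =
      ((l.find? (fun p => p.1 == k)).map (·.2)).toList := by
  induction l with
  | nil => simp
  | cons a l ih =>
    simp only [List.map_cons, List.nodup_cons] at h
    by_cases hk : a.1 = k
    · have hnil : l.filter (fun p => p.1 == k) = [] := by
        rw [List.filter_eq_nil_iff]
        intro p hp hpk
        exact h.1 (by rw [hk, ← (by simpa using hpk : p.1 = k)]; exact List.mem_map_of_mem hp)
      simp [List.find?, hk, hnil]
    · simp only [List.filter_cons, List.find?]
      have : (a.1 == k) = false := by simp [hk]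
      simp only [this, Bool.false_eq_true, if_false]
      exact ih h.2

-- the padding loop appends exactly (m) zeros
theorem pv_pad_foldl (l : List Int) (v : List Int) :
    l.foldl (fun v _ => v ++ [(0 : Int)]) v = v ++ List.replicate l.length 0 := by
  induction l generalizing v with
  | nil => simp
  | cons a l ih =>
    rw [List.foldl_cons, ih, List.append_assoc]
    simp [List.replicate_succ]
    
-- A's per-value padding equals B's arithmetic padding, given len v ≤ n
theorem pv_pad_eq (n : Nat) (v : List Int) (hv : v.length ≤ n) :
    (if (n : Int) ≠ PySem.List.len v then
       (PySem.List.pyRange 0 ((n : Int) - PySem.List.len v) 1).foldl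
         (fun v _ => v ++ [(0 : Int)]) v
     else v) = v ++ List.replicate (n - v.length) 0 := by
  by_cases h : (n : Int) = PySem.List.len v
  · have hn : n = v.length := by simp [PySem.List.len_eq] at h; omega
    subst hn
    simp [PySem.List.len_eq]
  · have hsub : (n : Int) - PySem.List.len v = ((n - v.length : Nat) : Int) := by
      simp [PySem.List.len_eq]; omega
    rw [if_pos h, hsub, PySem.List.pyRange_zero_natCast, pv_pad_foldl]
    simp

theorem massage_yrdata_eq (wd : List (String × List (String × Int))) :
    massage_yrdata wd = massage_yrdata_alt wd := by
  unfold massage_yrdata massage_yrdata_alt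
  set wdd := pvWd wd with hwdd
  -- normalise A's inner step to a single modify
  have hstep : (fun (dd : PySem.Dict String (List Int)) (kv : String × Int) =>
      (if dd.get? kv.1 = none then dd.insert kv.1 [] else dd).modify kv.1 [] (· ++ [kv.2]))
      = (fun dd kv => dd.modify kv.1 [] (· ++ [kv.2])) := by
    funext dd kv; exact pv_stepA_eq_modify dd kv.1 kv.2
  simp only [hstep]
  -- flatten the nested fold
  rw [show (fun (dd : PySem.Dict String (List Int)) (td : String × PySem.Dict String Int) =>
        td.2.items.foldl (fun dd kv => dd.modify kv.1 [] (· ++ [kv.2])) dd)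
      = (fun dd td => (td.2.items).foldl (fun dd kv => dd.modify kv.1 [] (· ++ [kv.2])) dd) from rfl,
    ← List.foldl_flatMap]
  set ap := wdd.items.flatMap (fun td => td.2.items) with hap
  set dd := ap.foldl (fun dd kv => dd.modify kv.1 [] (· ++ [kv.2])) PySem.Dict.empty with hdd
  -- keys of dd = B's key list
  have hkeys : dd.keys = PySem.List.dedup (wdd.values.flatMap (fun data => data.keys)) := by
    rw [hdd, PySem.Dict.keys_foldl_modify_key ap (fun kv => kv.1) [] (fun _ kv v => v ++ [kv.2])]
    simp only [PySem.Dict.keys_empty, PySem.Set.update_nil_left, PySem.List.dedup]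
    congr 1
    rw [hap]
    simp [List.map_flatMap, PySem.Dict.values, List.flatMap_map, PySem.Dict.keys]
  have hnodup : dd.keys.Nodup := by
    rw [hdd]
    exact PySem.Dict.nodup_keys_foldl_modify_key ap (fun kv => kv.1) [] (fun _ kv v => v ++ [kv.2])
      _ (by simp [PySem.Dict.keys_empty])
  -- dd's column at k = B's column at k
  have hcol : ∀ k, dd.getD k [] =
      wdd.values.filterMap (fun data => if data.contains k then data.get? k else none) := by
    intro k
    rw [hdd, PySem.Dict.getD_foldl_modify_append, PySem.Dict.getD_empty, List.nil_append, hap]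
    have : ∀ data : PySem.Dict String Int,
        (if data.contains k then data.get? k else none) = data.get? k := by
      intro data
      by_cases h : data.contains k
      · simp [h]
      · simp only [Bool.not_eq_true] at h
        simp [h, (PySem.Dict.get?_eq_none_iff_contains data k).mpr h]
    simp only [this]
    rw [PySem.Dict.values, List.filterMap_map, List.filter_flatMap, List.map_flatMap,
      List.filterMap_eq_flatMap_toList]
    apply List.flatMap_congr
    intro td htd
    rw [pv_filter_eq_find td.2.items k
      (pv_nodup_inner wd (List.mem_map_of_mem (a := td) htd))]
    rfl
  -- every column is at most n long
  have hlen : ∀ k, (dd.getD k []).length ≤ wdd.items.length := by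
    intro k
    rw [hcol k]
    calc (wdd.values.filterMap (fun data => if data.contains k then data.get? k else none)).length
        ≤ wdd.values.length := List.length_filterMap_le _ _
      _ = wdd.items.length := by rw [PySem.Dict.values, List.length_map]
  -- assemble the two result lists key by key
  rw [PySem.Dict.items_eq_map_keys dd hnodup [], List.map_map, ← hkeys]
  apply List.map_congr_left
  intro k hk
  simp only [Function.comp]
  have hn : PySem.List.len wdd.keys = ((wdd.items.length : Nat) : Int) := by
    rw [PySem.List.len_eq, PySem.Dict.keys, List.length_map]
  rw [hn, pv_pad_eq wdd.items.length (dd.getD k []) (hlen k), hcol k]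

-- ===== VERDICT (by name: the statement is the Claim_ definition above) =====
theorem massage_yrdata_spec : Claim_equal_massage_yrdata := by
  intro wd _
  exact massage_yrdata_eq wd
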